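-- pv_equiv track=rewrite | github.com/mosahle7/DSA_Python | numberTheory/isSumOf2Primes.py | isSumOfTwo
-- ===== SOURCE A (Python) =====
-- def isSumOfTwo (N):
--     primes=[True]*(N+1)
--     primes[0],primes[1]=False,False
--
--     for i in range(2,int(N**0.5)+1):
--         if primes[i]:
--             j=i*i
--             while j<=N:
--                 primes[j]=False
--                 j+=i
--
--     for i in range(2,N+1):
--         if primes[i]:
--             if primes[N-i]:
--                 return "Yes"
--
--     return 'No'
-- ===== SOURCE B (Python) =====
-- def isSumOfTwo(N):
--     # same sieve as A (so N<=0 raises IndexError the same way)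
--     primes = [True] * (N + 1)
--     primes[0], primes[1] = False, False
--     for i in range(2, int(N ** 0.5) + 1):
--         if primes[i]:
--             j = i * i
--             while j <= N:
--                 primes[j] = False
--                 j += i
--     # two-pointer sweep over the sorted list of primes instead of
--     # scanning every index and probing primes[N-i]
--     ps = [i for i in range(N + 1) if primes[i]]
--     lo, hi = 0, len(ps) - 1
--     while lo <= hi:
--         s = ps[lo] + ps[hi]
--         if s == N:
--             return "Yes"
--         if s < N:
--             lo += 1
--         else:
--             hi -= 1
--     return 'No'
-- ===== Notes on version B (the rewrite author's own statement) =====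
-- stated objective: alternative
-- what changed: The per-index scan probing primes[N-i] for every i in [2,N] is replaced by a closing two-pointer sweep over the sorted list of prime indices (return Yes when ps[lo]+ps[hi]==N, advance lo if the sum is low, retreat hi if high); the sieve construction is unchanged.
-- outside the precondition, e.g. on isSumOfTwo(0): A raises IndexError, B raises IndexError
import Mathlib
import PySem

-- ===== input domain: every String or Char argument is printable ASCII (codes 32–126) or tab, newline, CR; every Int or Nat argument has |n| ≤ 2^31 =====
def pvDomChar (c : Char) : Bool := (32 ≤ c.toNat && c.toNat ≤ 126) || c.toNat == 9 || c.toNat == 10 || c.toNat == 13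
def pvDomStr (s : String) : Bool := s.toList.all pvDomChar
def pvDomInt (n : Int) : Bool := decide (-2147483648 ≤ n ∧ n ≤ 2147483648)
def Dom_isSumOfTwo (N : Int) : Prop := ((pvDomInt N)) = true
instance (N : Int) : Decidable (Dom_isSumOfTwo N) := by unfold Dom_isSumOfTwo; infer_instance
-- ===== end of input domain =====

-- B replaces A's per-index scan (probing primes[N-i] for every i in [2,N]) by a closing
-- two-pointer sweep over the sorted list of prime indices; the sieve phase is the same code
-- in both sources, so it is one shared helper (pvSieve) here.  Objective: alternative
-- algorithm for the search phase.  Python lists are ported as Array (O(1) indexing, like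
-- CPython); every index that occurs under Pre_ is nonnegative and in range, where these
-- accessors are exact.

-- Python `xs[i]` / `xs[i] = v` for the in-range nonnegative indices used here
def pvGetB (pr : Array Bool) (i : Int) : Bool := pr.getD i.toNat false
def pvSetB (pr : Array Bool) (i : Int) (v : Bool) : Array Bool := pr.setIfInBounds i.toNat v
def pvGetI (ps : Array Int) (i : Int) : Int := ps.getD i.toNat 0

-- ===== PORT A =====
-- inner `while j<=N: primes[j]=False; j+=i` loop; the `0 < i` conjunct is only a
-- termination guard (every call site has i ≥ 2)
def pvInner (Nv i j : Int) (pr : Array Bool) : Array Bool :=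
  if _h : j ≤ Nv ∧ 0 < i then pvInner Nv i (j + i) (pvSetB pr j false) else pr
  termination_by (Nv + 1 - j).toNat
  decreasing_by omega

-- sieve phase, verbatim in both A and B: primes=[True]*(N+1); primes[0],primes[1]=False,False;
-- then the marking loop.  int(N**0.5) is ported as Nat.sqrt: exact for 0 ≤ N ≤ 2^31 (the
-- double sqrt is correctly rounded and 1/(2·sqrt N) far exceeds its rounding error there).
def pvSieve (N : Int) : Array Bool :=
  (PySem.List.pyRange 2 ((N.toNat.sqrt : Int) + 1)).foldl
    (fun pr i => if pvGetB pr i then pvInner N i (i * i) pr else pr)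
    (pvSetB (pvSetB (Array.replicate (N + 1).toNat true) 0 false) 1 false)

-- A's search: `for i in range(2,N+1): if primes[i]: if primes[N-i]: return "Yes"`, then 'No'
def pvScan (N : Int) (pr : Array Bool) (i : Int) : String :=
  if _h : i ≤ N then
    if pvGetB pr i then
      if pvGetB pr (N - i) then "Yes" else pvScan N pr (i + 1)
    else pvScan N pr (i + 1)
  else "No"
  termination_by (N + 1 - i).toNat
  decreasing_by all_goals omega

def isSumOfTwo (N : Int) : String := pvScan N (pvSieve N) 2

-- ===== PORT B =====
-- `ps = [i for i in range(N+1) if primes[i]]`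
def pvPsL (N : Int) : List Int :=
  let pr := pvSieve N
  (PySem.List.pyRange 0 (N + 1)).filter (fun i => pvGetB pr i)

def pvPs (N : Int) : Array Int := (pvPsL N).toArray

-- B's two-pointer loop: `while lo<=hi: s=ps[lo]+ps[hi]; …`
def pvTP (N : Int) (ps : Array Int) (lo hi : Int) : String :=
  if _h : lo ≤ hi then
    let s := pvGetI ps lo + pvGetI ps hi
    if s = N then "Yes"
    else if s < N then pvTP N ps (lo + 1) hi
    else pvTP N ps lo (hi - 1)
  else "No"
  termination_by (hi + 1 - lo).toNat
  decreasing_by all_goals omega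

def isSumOfTwo_alt (N : Int) : String :=
  let ps := pvPs N
  pvTP N ps 0 ((ps.size : Int) - 1)

-- ===== PRECONDITION & SPEC =====
-- Pre_ excludes exactly N ≤ 0, where `primes[0],primes[1]=False,False` raises IndexError
-- in A (and identically in B).
def Pre_isSumOfTwo (N : Int) : Prop := 1 ≤ N
instance (N : Int) : Decidable (Pre_isSumOfTwo N) := by unfold Pre_isSumOfTwo; infer_instance
def pvWitness_isSumOfTwo : Int := (10)

def Spec_isSumOfTwo (N : Int) (out : String) : Prop := out = isSumOfTwo_alt N
instance (N : Int) (out : String) : Decidable (Spec_isSumOfTwo N out) := by unfold Spec_isSumOfTwo; infer_instance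

-- ===== CLAIM (what is proved, stated in full; the proofs are below) =====
def Claim_equal_isSumOfTwo : Prop := ∀ (N : Int), Dom_isSumOfTwo N → Pre_isSumOfTwo N → Spec_isSumOfTwo N (isSumOfTwo N)

-- ===== LEMMAS AND PROOFS =====

-- setting any position to false never turns a read-as-true on
theorem pvSetFalse_true {pr : Array Bool} {j k : Int}
    (h : pvGetB (pvSetB pr j false) k = true) : pvGetB pr k = true := by
  simp only [pvGetB, pvSetB, Array.getD_eq_getD_getElem?, Array.getElem?_setIfInBounds] at h ⊢
  split at h
  · split at h <;> simp_all
  · exact h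

theorem pvInner_true {Nv i j : Int} {pr : Array Bool} {k : Int}
    (h : pvGetB (pvInner Nv i j pr) k = true) : pvGetB pr k = true := by
  fun_induction pvInner Nv i j pr with
  | case1 j pr hc ih => exact pvSetFalse_true (ih h)
  | case2 j pr hc => exact h

-- the sieve never reports k ∈ {0,1} as prime (for N ≥ 1)
theorem pvSieve_low (N k : Int) (hN : 1 ≤ N) (hk : k = 0 ∨ k = 1) :
    pvGetB (pvSieve N) k = false := by
  unfold pvSieve
  refine List.foldlRecOn (motive := fun pr => pvGetB pr k = false) _ _ ?_ ?_
  · rcases hk with hk | hk <;> subst hk <;>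
      simp [pvGetB, pvSetB, Array.getD_eq_getD_getElem?, Array.size_setIfInBounds, Array.size_replicate,
        show 1 < (N + 1).toNat by omega, show 0 < (N + 1).toNat by omega]
  · intro pr hpr i _
    dsimp only
    split
    · cases hval : pvGetB (pvInner N i (i * i) pr) k
      · rfl
      · exact absurd (pvInner_true hval) (by simp [hpr])
    · exact hpr

-- characterisation of A's scan
theorem pvScan_yes (N : Int) (pr : Array Bool) :
    ∀ (n : Nat) (lo : Int), (N + 1 - lo).toNat = n →
    (pvScan N pr lo = "Yes" ↔ ∃ i : Int, lo ≤ i ∧ i ≤ N ∧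
      pvGetB pr i = true ∧ pvGetB pr (N - i) = true) := by
  intro n
  induction n with
  | zero =>
    intro lo hn
    rw [pvScan, dif_neg (by omega)]
    constructor
    · intro h; exact absurd h (by simp)
    · rintro ⟨i, h1, h2, -⟩; omega
  | succ m ih =>
    intro lo hn
    rw [pvScan, dif_pos (show lo ≤ N by omega)]
    by_cases h1 : pvGetB pr lo = true
    · rw [if_pos h1]
      by_cases h2 : pvGetB pr (N - lo) = true
      · rw [if_pos h2]
        exact iff_of_true rfl ⟨lo, le_refl lo, by omega, h1, h2⟩
      · rw [if_neg h2, ih (lo + 1) (by omega)]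
        constructor
        · rintro ⟨i, ha, hb, hc⟩; exact ⟨i, by omega, hb, hc⟩
        · rintro ⟨i, ha, hb, hc, hd⟩
          refine ⟨i, ?_, hb, hc, hd⟩
          rcases eq_or_lt_of_le ha with he | he
          · exact absurd (he ▸ hd) h2
          · omega
    · rw [if_neg h1, ih (lo + 1) (by omega)]
      constructor
      · rintro ⟨i, ha, hb, hc⟩; exact ⟨i, by omega, hb, hc⟩
      · rintro ⟨i, ha, hb, hc, hd⟩
        refine ⟨i, ?_, hb, hc, hd⟩
        rcases eq_or_lt_of_le ha with he | he
        · exact absurd (he ▸ hc) h1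
        · omega

theorem pvScan_no (N : Int) (pr : Array Bool) (lo : Int) (h : pvScan N pr lo ≠ "Yes") :
    pvScan N pr lo = "No" := by
  fun_induction pvScan N pr lo <;> simp_all

-- reading the array built from a list
theorem pvGetI_eq (l : List Int) {i : Int} (h0 : 0 ≤ i) (h1 : i < (l.length : Int)) :
    pvGetI l.toArray i = l[i.toNat]'(by omega) := by
  simp only [pvGetI, Array.getD_eq_getD_getElem?, List.getElem?_toArray]
  rw [List.getElem?_eq_getElem (by omega)]
  rfl

-- monotone access on a sorted list's array
theorem pvMono (l : List Int) (hs : l.Pairwise (· ≤ ·)) {i j : Int}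
    (h0 : 0 ≤ i) (hij : i ≤ j) (hj : j < (l.length : Int)) :
    pvGetI l.toArray i ≤ pvGetI l.toArray j := by
  rcases eq_or_lt_of_le hij with he | he
  · subst he; exact le_refl _
  · rw [pvGetI_eq l h0 (by omega), pvGetI_eq l (by omega) hj]
    exact (List.pairwise_iff_getElem.mp hs) i.toNat j.toNat (by omega) (by omega) (by omega)

theorem pvTP_sound (N : Int) (l : List Int) :
    ∀ (n : Nat) (lo hi : Int), (hi + 1 - lo).toNat = n →
    0 ≤ lo → hi < (l.length : Int) →
    pvTP N l.toArray lo hi = "Yes" → ∃ a ∈ l, ∃ b ∈ l, a + b = N := by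
  intro n
  induction n with
  | zero =>
    intro lo hi hn _ _ h
    rw [pvTP, dif_neg (by omega)] at h
    exact absurd h (by simp)
  | succ m ih =>
    intro lo hi hn hlo hhi h
    rw [pvTP, dif_pos (show lo ≤ hi by omega)] at h
    by_cases hs : pvGetI l.toArray lo + pvGetI l.toArray hi = N
    · rw [pvGetI_eq l hlo (by omega), pvGetI_eq l (by omega) hhi] at hs
      exact ⟨_, l.getElem_mem _, _, l.getElem_mem _, hs⟩
    · rw [if_neg hs] at h
      by_cases hlt : pvGetI l.toArray lo + pvGetI l.toArray hi < N
      · rw [if_pos hlt] at h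
        exact ih (lo + 1) hi (by omega) (by omega) hhi h
      · rw [if_neg hlt] at h
        exact ih lo (hi - 1) (by omega) hlo (by omega) h

theorem pvTP_complete (N : Int) (l : List Int) (hsort : l.Pairwise (· ≤ ·)) :
    ∀ (n : Nat) (lo hi : Int), (hi + 1 - lo).toNat = n →
    0 ≤ lo → hi < (l.length : Int) →
    (∃ i j : Int, lo ≤ i ∧ i ≤ j ∧ j ≤ hi ∧
      pvGetI l.toArray i + pvGetI l.toArray j = N) →
    pvTP N l.toArray lo hi = "Yes" := by
  intro n
  induction n with
  | zero => rintro lo hi hn _ _ ⟨i, j, h1, h2, h3, -⟩; omega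
  | succ m ih =>
    rintro lo hi hn hlo hhi ⟨i, j, h1, h2, h3, hsum⟩
    rw [pvTP, dif_pos (show lo ≤ hi by omega)]
    by_cases hs : pvGetI l.toArray lo + pvGetI l.toArray hi = N
    · rw [if_pos hs]
    · rw [if_neg hs]
      by_cases hlt : pvGetI l.toArray lo + pvGetI l.toArray hi < N
      · rw [if_pos hlt]
        refine ih (lo + 1) hi (by omega) (by omega) hhi ⟨i, j, ?_, h2, h3, hsum⟩
        -- i ≠ lo: otherwise ps[lo]+ps[j] ≤ ps[lo]+ps[hi] < N contradicts the pair
        rcases eq_or_lt_of_le h1 with he | he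
        · exfalso
          have hm : pvGetI l.toArray j ≤ pvGetI l.toArray hi :=
            pvMono l hsort (by omega) h3 hhi
          rw [← he] at hsum; omega
        · omega
      · rw [if_neg hlt]
        refine ih lo (hi - 1) (by omega) hlo (by omega) ⟨i, j, h1, h2, ?_, hsum⟩
        -- j ≠ hi: otherwise ps[i]+ps[hi] ≥ ps[lo]+ps[hi] > N contradicts the pair
        rcases eq_or_lt_of_le h3 with he | he
        · exfalso
          have hm : pvGetI l.toArray lo ≤ pvGetI l.toArray i :=
            pvMono l hsort hlo h1 (by omega)
          rw [he] at hsum; omega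
        · omega

theorem pvTP_no (N : Int) (ps : Array Int) (lo hi : Int) (h : pvTP N ps lo hi ≠ "Yes") :
    pvTP N ps lo hi = "No" := by
  fun_induction pvTP N ps lo hi <;> simp_all

theorem pvPsL_mem (N a : Int) :
    a ∈ pvPsL N ↔ (0 ≤ a ∧ a < N + 1) ∧ pvGetB (pvSieve N) a = true := by
  simp [pvPsL, List.mem_filter, PySem.List.mem_pyRange_one]

theorem pvPsL_sorted (N : Int) : (pvPsL N).Pairwise (· ≤ ·) :=
  ((PySem.List.pairwise_lt_pyRange_one 0 (N + 1)).filter _).imp (fun h => le_of_lt h)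

-- elements of ps are ≥ 2 (for N ≥ 1)
theorem pvPsL_two_le (N a : Int) (hN : 1 ≤ N) (ha : a ∈ pvPsL N) : 2 ≤ a := by
  rcases (pvPsL_mem N a).mp ha with ⟨⟨h0, -⟩, ht⟩
  by_contra hlt
  have hk : a = 0 ∨ a = 1 := by omega
  rw [pvSieve_low N a hN hk] at ht
  exact absurd ht (by simp)

-- A's scan condition and B's pair condition coincide
theorem pv_cond (N : Int) (hN : 1 ≤ N) :
    (∃ i : Int, 2 ≤ i ∧ i ≤ N ∧ pvGetB (pvSieve N) i = true ∧
        pvGetB (pvSieve N) (N - i) = true) ↔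
    (∃ a ∈ pvPsL N, ∃ b ∈ pvPsL N, a + b = N) := by
  constructor
  · rintro ⟨i, h2, hiN, hp, hq⟩
    refine ⟨i, (pvPsL_mem N i).mpr ⟨⟨by omega, by omega⟩, hp⟩,
            N - i, (pvPsL_mem N (N - i)).mpr ⟨⟨by omega, by omega⟩, hq⟩, by omega⟩
  · rintro ⟨a, ha, b, hb, hab⟩
    have h2a := pvPsL_two_le N a hN ha
    have h2b := pvPsL_two_le N b hN hb
    rcases (pvPsL_mem N a).mp ha with ⟨⟨-, haN⟩, hpa⟩
    rcases (pvPsL_mem N b).mp hb with ⟨-, hpb⟩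
    exact ⟨a, h2a, by omega, hpa, by rw [show N - a = b by omega]; exact hpb⟩

-- pair-of-members ↔ pair-of-indices
theorem pv_pair_idx (N : Int) :
    (∃ a ∈ pvPsL N, ∃ b ∈ pvPsL N, a + b = N) ↔
    (∃ i j : Int, 0 ≤ i ∧ i ≤ j ∧ j ≤ ((pvPsL N).length : Int) - 1 ∧
      pvGetI (pvPsL N).toArray i + pvGetI (pvPsL N).toArray j = N) := by
  constructor
  · rintro ⟨a, ha, b, hb, hab⟩
    rcases List.mem_iff_getElem.mp ha with ⟨ia, hia, rfl⟩
    rcases List.mem_iff_getElem.mp hb with ⟨ib, hib, rfl⟩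
    rcases le_total ia ib with hle | hle
    · refine ⟨(ia : Int), (ib : Int), by omega, by exact_mod_cast hle, by omega, ?_⟩
      rw [pvGetI_eq _ (by omega) (by exact_mod_cast hia),
          pvGetI_eq _ (by omega) (by exact_mod_cast hib)]
      simpa using hab
    · refine ⟨(ib : Int), (ia : Int), by omega, by exact_mod_cast hle, by omega, ?_⟩
      rw [pvGetI_eq _ (by omega) (by exact_mod_cast hib),
          pvGetI_eq _ (by omega) (by exact_mod_cast hia)]
      simp; omega
  · rintro ⟨i, j, h0, hij, hj, hsum⟩
    rw [pvGetI_eq _ (by omega) (by omega), pvGetI_eq _ (by omega) (by omega)] at hsum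
    exact ⟨_, (pvPsL N).getElem_mem _, _, (pvPsL N).getElem_mem _, hsum⟩

-- the two programs agree
theorem pv_main (N : Int) (hN : 1 ≤ N) :
    isSumOfTwo N = isSumOfTwo_alt N := by
  have hA := pvScan_yes N (pvSieve N) (N + 1 - 2).toNat 2 rfl
  have hAiff : isSumOfTwo N = "Yes" ↔
      (∃ a ∈ pvPsL N, ∃ b ∈ pvPsL N, a + b = N) := by
    rw [isSumOfTwo, hA, ← pv_cond N hN]
  have hsize : (pvPs N).size = (pvPsL N).length := by simp [pvPs]
  have halt : isSumOfTwo_alt N = pvTP N (pvPsL N).toArray 0 (((pvPsL N).length : Int) - 1) := by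
    rw [isSumOfTwo_alt, hsize]; rfl
  have hBiff : isSumOfTwo_alt N = "Yes" ↔
      (∃ a ∈ pvPsL N, ∃ b ∈ pvPsL N, a + b = N) := by
    rw [halt]
    constructor
    · intro h
      exact pvTP_sound N (pvPsL N) _ 0 (((pvPsL N).length : Int) - 1) rfl (le_refl 0)
        (by omega) h
    · intro h
      rcases (pv_pair_idx N).mp h with ⟨i, j, h0, hij, hj, hsum⟩
      exact pvTP_complete N (pvPsL N) (pvPsL_sorted N) _ 0 (((pvPsL N).length : Int) - 1) rfl
        (le_refl 0) (by omega) ⟨i, j, h0, hij, hj, hsum⟩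
  by_cases hy : isSumOfTwo N = "Yes"
  · rw [hy, (hBiff.mpr (hAiff.mp hy)).symm]
  · have hb : ¬ isSumOfTwo_alt N = "Yes" := fun hc => hy (hAiff.mpr (hBiff.mp hc))
    rw [isSumOfTwo] at hy ⊢
    rw [isSumOfTwo_alt] at hb ⊢
    rw [pvScan_no N (pvSieve N) 2 hy, pvTP_no N (pvPs N) 0 _ hb]

-- ===== VERDICT (by name: the statement is the Claim_ definition above) =====
theorem isSumOfTwo_spec : Claim_equal_isSumOfTwo := by
  intro N _ hPre
  unfold Spec_isSumOfTwo
  exact pv_main N hPre
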